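-- pv_equiv track=rewrite | github.com/whitemech/Plan4Past | benchmark/utils/triangletireworld.py | _locs_goal_order_zigzag_old
-- ===== SOURCE A (Python) =====
-- from itertools import zip_longest
--
-- def _locs_goal_order_zigzag_old(nb_locs: int):
--     assert nb_locs >= 2
--     nb_twins = (nb_locs + 1) // 2
--     nb_siblings = nb_locs // 2
--     twins = [f"l{i}x{i}" for i in range(1, nb_twins + 1)]
--     siblings = [f"l{i + 1}x{i}" for i in range(1, nb_siblings + 1)]
--     result = []
--     for twin, sibling in zip_longest(twins, siblings, fillvalue=None):
--         if twin is not None: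
--             result.append(twin)
--         if sibling is not None:
--             result.append(sibling)
--     return result
-- ===== SOURCE B (Python) =====
-- def _locs_goal_order_zigzag_old(nb_locs: int):
--     assert nb_locs >= 2
--     half = nb_locs // 2
--     result = [s for i in range(1, half + 1) for s in (f"l{i}x{i}", f"l{i + 1}x{i}")]
--     if nb_locs % 2:
--         result.append(f"l{half + 1}x{half + 1}")
--     return result
-- ===== Notes on version B (the rewrite author's own statement) =====
-- stated objective: simpler
-- what changed: Drops the separate twin/sibling lists and the zip_longest merge: one comprehension emits each interleaved pair l{i}x{i}, l{i+1}x{i} directly, and a single append adds the unpaired final twin when nb_locs is odd.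
import Mathlib
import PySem

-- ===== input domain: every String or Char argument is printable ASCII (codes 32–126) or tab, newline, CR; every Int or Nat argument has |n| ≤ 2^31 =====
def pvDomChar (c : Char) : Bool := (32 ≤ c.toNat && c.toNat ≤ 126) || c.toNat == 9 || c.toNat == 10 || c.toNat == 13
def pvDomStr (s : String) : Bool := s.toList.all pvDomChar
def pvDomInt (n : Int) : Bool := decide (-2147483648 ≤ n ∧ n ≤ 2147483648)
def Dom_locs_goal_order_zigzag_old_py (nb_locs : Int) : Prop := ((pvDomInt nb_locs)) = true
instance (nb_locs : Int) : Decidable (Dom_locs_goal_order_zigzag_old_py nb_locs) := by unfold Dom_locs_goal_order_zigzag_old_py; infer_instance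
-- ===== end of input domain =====

-- B replaces the twin/sibling lists and the zip_longest merge by computing each
-- output string directly from its position (simpler decomposition, same O(n) cost).

-- ===== PORT A =====
-- the zip_longest(fillvalue=None) loop with its two 'is not None' appends,
-- transliterated as a structural recursion over the two lists
def pvMergeA : List String → List String → List String
  | [], [] => []
  | t :: ts, [] => t :: pvMergeA ts []
  | [], s :: ss => s :: pvMergeA [] ss
  | t :: ts, s :: ss => t :: s :: pvMergeA ts ss

def locs_goal_order_zigzag_old_py (nb_locs : Int) : List String :=
  let nb_twins := PySem.Int.floordiv (nb_locs + 1) 2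
  let nb_siblings := PySem.Int.floordiv nb_locs 2
  let twins := (PySem.List.pyRange 1 (nb_twins + 1) 1).map
      (fun i => "l" ++ PySem.Int.toStr i ++ "x" ++ PySem.Int.toStr i)
  let siblings := (PySem.List.pyRange 1 (nb_siblings + 1) 1).map
      (fun i => "l" ++ PySem.Int.toStr (i + 1) ++ "x" ++ PySem.Int.toStr i)
  pvMergeA twins siblings

-- ===== PORT B =====
def locs_goal_order_zigzag_old_py_alt (nb_locs : Int) : List String :=
  let half := PySem.Int.floordiv nb_locs 2
  let result := (PySem.List.pyRange 1 (half + 1) 1).flatMap (fun i =>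
    ["l" ++ PySem.Int.toStr i ++ "x" ++ PySem.Int.toStr i,
     "l" ++ PySem.Int.toStr (i + 1) ++ "x" ++ PySem.Int.toStr i])
  if PySem.Int.mod nb_locs 2 == 0 then result
  else result ++ ["l" ++ PySem.Int.toStr (half + 1) ++ "x" ++ PySem.Int.toStr (half + 1)]

-- ===== PRECONDITION & SPEC =====
-- Python A raises AssertionError for nb_locs < 2 ('assert nb_locs >= 2')
def Pre_locs_goal_order_zigzag_old_py (nb_locs : Int) : Prop := 2 ≤ nb_locs
instance (nb_locs : Int) : Decidable (Pre_locs_goal_order_zigzag_old_py nb_locs) := by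
  unfold Pre_locs_goal_order_zigzag_old_py; infer_instance

def pvWitness_locs_goal_order_zigzag_old_py : Int := 5

def Spec_locs_goal_order_zigzag_old_py (nb_locs : Int) (out : List String) : Prop :=
  out = locs_goal_order_zigzag_old_py_alt nb_locs
instance (nb_locs : Int) (out : List String) : Decidable (Spec_locs_goal_order_zigzag_old_py nb_locs out) := by
  unfold Spec_locs_goal_order_zigzag_old_py; infer_instance

-- ===== CLAIM (what is proved, stated in full; the proofs are below) =====
def Claim_equal_locs_goal_order_zigzag_old_py : Prop := ∀ (nb_locs : Int), Dom_locs_goal_order_zigzag_old_py nb_locs → Pre_locs_goal_order_zigzag_old_py nb_locs → Spec_locs_goal_order_zigzag_old_py nb_locs (locs_goal_order_zigzag_old_py nb_locs)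

-- ===== LEMMAS AND PROOFS =====

def pvName (a b : Int) : String :=
  "l" ++ PySem.Int.toStr a ++ "x" ++ PySem.Int.toStr b

def pvTwL (t : Nat) : List String := (List.range t).map (fun k : Nat => pvName ((k : Int) + 1) ((k : Int) + 1))
def pvSbL (s : Nat) : List String := (List.range s).map (fun k : Nat => pvName ((k : Int) + 2) ((k : Int) + 1))
def pvZgF (k : Nat) : String :=
  if k % 2 = 0 then pvName ((k / 2 : Nat) + 1) ((k / 2 : Nat) + 1)
  else pvName ((k / 2 : Nat) + 2) ((k / 2 : Nat) + 1)
def pvZgL (n : Nat) : List String := (List.range n).map pvZgF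

theorem pvMergeA_snoc_left (xs ys : List String) (a : String)
    (h : xs.length = ys.length) : pvMergeA (xs ++ [a]) ys = pvMergeA xs ys ++ [a] := by
  induction xs generalizing ys with
  | nil => cases ys with
    | nil => simp [pvMergeA]
    | cons y ys => simp at h
  | cons x xs ih => cases ys with
    | nil => simp at h
    | cons y ys =>
      simp only [List.cons_append, pvMergeA, List.length_cons] at *
      rw [ih ys (by omega)]

theorem pvMergeA_snoc_right (xs ys : List String) (b : String)
    (h : xs.length = ys.length + 1) : pvMergeA xs (ys ++ [b]) = pvMergeA xs ys ++ [b] := by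
  induction xs generalizing ys with
  | nil => simp at h
  | cons x xs ih => cases ys with
    | nil =>
      cases xs with
      | nil => simp [pvMergeA]
      | cons z zs => simp at h
    | cons y ys =>
      simp only [List.cons_append, pvMergeA, List.length_cons] at *
      rw [ih ys (by omega)]

theorem pvTwL_succ (t : Nat) : pvTwL (t + 1) = pvTwL t ++ [pvName ((t : Int) + 1) ((t : Int) + 1)] := by
  simp [pvTwL, List.range_succ]

theorem pvSbL_succ (s : Nat) : pvSbL (s + 1) = pvSbL s ++ [pvName ((s : Int) + 2) ((s : Int) + 1)] := by
  simp [pvSbL, List.range_succ]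

theorem pvZgL_succ (n : Nat) : pvZgL (n + 1) = pvZgL n ++ [pvZgF n] := by
  simp [pvZgL, List.range_succ]

theorem pvTwL_length (t : Nat) : (pvTwL t).length = t := by simp [pvTwL]
theorem pvSbL_length (s : Nat) : (pvSbL s).length = s := by simp [pvSbL]

theorem pvMain (m : Nat) : pvMergeA (pvTwL ((m + 1) / 2)) (pvSbL (m / 2)) = pvZgL m := by
  induction m with
  | zero => simp [pvTwL, pvSbL, pvZgL, pvMergeA]
  | succ m ih =>
    rcases Nat.even_or_odd m with ⟨k, hk⟩ | ⟨k, hk⟩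
    · -- m = 2k : twins grow
      subst hk
      have h1 : (k + k + 1 + 1) / 2 = k + 1 := by omega
      have h2 : (k + k + 1) / 2 = k := by omega
      have h3 : (k + k) / 2 = k := by omega
      rw [h1, h2, pvTwL_succ, pvMergeA_snoc_left _ _ _ (by rw [pvTwL_length, pvSbL_length])]
      rw [h2, h3] at ih
      conv_rhs => rw [pvZgL_succ]
      rw [ih]
      have hz : pvZgF (k + k) = pvName ((k : Int) + 1) ((k : Int) + 1) := by
        have he : (k + k) % 2 = 0 := by omega
        have hd : (k + k) / 2 = k := by omega
        simp [pvZgF, he, hd]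
      rw [hz]
    · -- m = 2k+1 : siblings grow
      subst hk
      have h1 : (2 * k + 1 + 1 + 1) / 2 = k + 1 := by omega
      have h2 : (2 * k + 1 + 1) / 2 = k + 1 := by omega
      have h3 : (2 * k + 1) / 2 = k := by omega
      rw [h1, h2, pvSbL_succ, pvMergeA_snoc_right _ _ _ (by rw [pvTwL_length, pvSbL_length])]
      rw [h2, h3] at ih
      conv_rhs => rw [pvZgL_succ]
      rw [ih]
      have hz : pvZgF (2 * k + 1) = pvName ((k : Int) + 2) ((k : Int) + 1) := by
        have ho : (2 * k + 1) % 2 = 1 := by omega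
        have hd : (2 * k + 1) / 2 = k := by omega
        simp [pvZgF, ho, hd]
      rw [hz]

theorem pvA_eq (m : Nat) :
    locs_goal_order_zigzag_old_py (m : Int) = pvMergeA (pvTwL ((m + 1) / 2)) (pvSbL (m / 2)) := by
  unfold locs_goal_order_zigzag_old_py
  have ht : PySem.Int.floordiv ((m : Int) + 1) 2 = (((m + 1) / 2 : Nat) : Int) := by
    rw [show ((m : Int) + 1) = ((m + 1 : Nat) : Int) by push_cast; ring]
    exact_mod_cast PySem.Int.floordiv_natCast (m + 1) 2
  have hs : PySem.Int.floordiv (m : Int) 2 = ((m / 2 : Nat) : Int) := by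
    exact_mod_cast PySem.Int.floordiv_natCast m 2
  rw [ht, hs]
  dsimp only
  congr 1
  · rw [PySem.List.pyRange_one]
    have : ((((m + 1) / 2 : Nat) : Int) + 1 - 1).toNat = (m + 1) / 2 := by omega
    rw [this, List.map_map]
    unfold pvTwL
    refine List.map_congr_left (fun k _ => ?_)
    simp only [Function.comp_apply, pvName]
    ring_nf
  · rw [PySem.List.pyRange_one]
    have : (((m / 2 : Nat) : Int) + 1 - 1).toNat = m / 2 := by omega
    rw [this, List.map_map]
    unfold pvSbL
    refine List.map_congr_left (fun k _ => ?_)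
    simp only [Function.comp_apply, pvName]
    ring_nf

def pvPairL (h : Nat) : List String :=
  (List.range h).flatMap (fun k : Nat =>
    [pvName ((k : Int) + 1) ((k : Int) + 1), pvName ((k : Int) + 2) ((k : Int) + 1)])

theorem pvPairL_eq (h : Nat) : pvPairL h = pvZgL (2 * h) := by
  induction h with
  | zero => rfl
  | succ h ih =>
    have e1 : 2 * (h + 1) = (2 * h + 1) + 1 := by omega
    rw [pvPairL, List.range_succ, List.flatMap_append, ← pvPairL, ih, e1,
        pvZgL_succ, pvZgL_succ]
    have hz1 : pvZgF (2 * h) = pvName ((h : Int) + 1) ((h : Int) + 1) := by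
      have he : (2 * h) % 2 = 0 := by omega
      have hd : (2 * h) / 2 = h := by omega
      simp [pvZgF, he, hd]
    have hz2 : pvZgF (2 * h + 1) = pvName ((h : Int) + 2) ((h : Int) + 1) := by
      have ho : (2 * h + 1) % 2 = 1 := by omega
      have hd : (2 * h + 1) / 2 = h := by omega
      simp [pvZgF, ho, hd]
    simp [hz1, hz2]

theorem pvB_flatMap (h : Nat) :
    (PySem.List.pyRange 1 ((h : Int) + 1) 1).flatMap (fun i =>
      ["l" ++ PySem.Int.toStr i ++ "x" ++ PySem.Int.toStr i,
       "l" ++ PySem.Int.toStr (i + 1) ++ "x" ++ PySem.Int.toStr i]) = pvPairL h := by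
  rw [PySem.List.pyRange_one]
  have e : ((h : Int) + 1 - 1).toNat = h := by omega
  rw [e, List.flatMap_map, pvPairL]
  refine List.flatMap_congr (fun k _ => ?_)
  simp only [pvName]
  ring_nf

theorem pvB_eq (m : Nat) : locs_goal_order_zigzag_old_py_alt (m : Int) = pvZgL m := by
  unfold locs_goal_order_zigzag_old_py_alt
  have hs : PySem.Int.floordiv (m : Int) 2 = ((m / 2 : Nat) : Int) := by
    exact_mod_cast PySem.Int.floordiv_natCast m 2
  have hm : PySem.Int.mod (m : Int) 2 = ((m % 2 : Nat) : Int) := by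
    exact_mod_cast PySem.Int.mod_natCast m 2
  rw [hs, hm]
  dsimp only
  rw [pvB_flatMap, pvPairL_eq]
  rcases Nat.even_or_odd m with ⟨k, hk⟩ | ⟨k, hk⟩
  · have he : m % 2 = 0 := by omega
    have hd : 2 * (m / 2) = m := by omega
    simp [he, hd]
  · have ho : m % 2 = 1 := by omega
    have hd : m / 2 = k := by omega
    have e1 : 2 * (m / 2) = m - 1 := by omega
    have hz : pvZgF (2 * k) = pvName ((k : Int) + 1) ((k : Int) + 1) := by
      have h2 : (2 * k) % 2 = 0 := by omega
      have h3 : (2 * k) / 2 = k := by omega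
      simp [pvZgF, h2, h3]
    simp only [ho]
    norm_num
    rw [hd]
    conv_rhs => rw [show m = 2 * k + 1 from by omega, pvZgL_succ]
    rw [hz]
    have h4 : (m : Int) / 2 = (k : Int) := by omega
    rw [h4]
    simp [pvName]

-- ===== VERDICT (by name: the statement is the Claim_ definition above) =====
theorem locs_goal_order_zigzag_old_py_spec : Claim_equal_locs_goal_order_zigzag_old_py := by
  intro nb_locs _ hpre
  unfold Spec_locs_goal_order_zigzag_old_py
  have hm : nb_locs = (nb_locs.toNat : Int) := by
    have : (0 : Int) ≤ nb_locs := le_trans (by norm_num) hpre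
    omega
  rw [hm, pvA_eq, pvB_eq, pvMain]
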